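-- pv_equiv track=rewrite | github.com/Orange9000/Codewars | Solutions/6kyu/6kyu_connect_four_placing_tokens.py | connect_four_place
-- ===== SOURCE A (Python) =====
-- def connect_four_place(columns):
--     source = [['-', '-', '-', '-', '-', '-', '-'],
--               ['-', '-', '-', '-', '-', '-', '-'],
--               ['-', '-', '-', '-', '-', '-', '-'],
--               ['-', '-', '-', '-', '-', '-', '-'],
--               ['-', '-', '-', '-', '-', '-', '-'],
--               ['-', '-', '-', '-', '-', '-', '-']]
--
--     token = ['Y','R']
--
--     for pos in columns:
--         for num, subarr in enumerate(source):
--             if source[num][pos] == '-':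
--                 source[num][pos] = token[0]
--                 token.reverse()
--                 break
--
--     return source[::-1]
-- ===== SOURCE B (Python) =====
-- def connect_four_place(columns):
--     board = [['-'] * 7 for _ in range(6)]
--     heights = [0] * 7
--     placed = 0
--     for pos in columns:
--         if heights[pos] < 6:
--             board[heights[pos]][pos] = 'Y' if placed % 2 == 0 else 'R'
--             heights[pos] += 1
--             placed += 1
--     return board[::-1]
-- ===== Notes on version B (the rewrite author's own statement) =====
-- stated objective: faster
-- what changed: B keeps a per-column fill-height list and a placement counter and writes each token into its cell directly, instead of A's scan over the six board rows (with token-list reversal) per drop.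
import Mathlib
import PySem

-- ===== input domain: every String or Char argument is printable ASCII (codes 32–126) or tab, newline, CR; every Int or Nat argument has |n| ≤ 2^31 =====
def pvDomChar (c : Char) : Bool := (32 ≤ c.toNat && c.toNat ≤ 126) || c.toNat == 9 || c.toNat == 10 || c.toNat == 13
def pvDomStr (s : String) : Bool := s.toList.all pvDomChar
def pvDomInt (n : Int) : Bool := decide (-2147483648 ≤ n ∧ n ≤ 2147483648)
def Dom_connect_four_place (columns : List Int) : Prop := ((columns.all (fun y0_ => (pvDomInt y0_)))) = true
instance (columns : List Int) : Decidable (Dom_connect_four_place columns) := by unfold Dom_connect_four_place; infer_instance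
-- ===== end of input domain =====

-- B replaces A's per-drop scan over all board rows by a per-column fill-height list and
-- a placement counter, so each drop touches one cell directly (objective: faster, constant factor).

-- ===== PORT A =====
-- inner `for num, subarr in enumerate(source): if source[num][pos] == '-': …; break`
-- (an out-of-range pos raises IndexError in Python — excluded by Pre_; the port skips there)
def pvAinner (pos : Int) (tok : String) : List (List String) → List (List String) × Bool
  | [] => ([], false)
  | row :: rest =>
    if PySem.List.pyGet? row pos = some "-" then
      (PySem.List.pySetD row pos tok :: rest, true)
    else
      let r := pvAinner pos tok rest
      (row :: r.1, r.2)

-- one iteration of A's outer loop: state = (source, token)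
def pvAstep (st : List (List String) × List String) (pos : Int) :
    List (List String) × List String :=
  let r := pvAinner pos (PySem.List.pyGetD st.2 0 "") st.1
  (r.1, if r.2 then st.2.reverse else st.2)

def connect_four_place (columns : List Int) : List (List String) :=
  let source : List (List String) :=
    [["-", "-", "-", "-", "-", "-", "-"],
     ["-", "-", "-", "-", "-", "-", "-"],
     ["-", "-", "-", "-", "-", "-", "-"],
     ["-", "-", "-", "-", "-", "-", "-"],
     ["-", "-", "-", "-", "-", "-", "-"],
     ["-", "-", "-", "-", "-", "-", "-"]]
  let fin := columns.foldl pvAstep (source, ["Y", "R"])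
  (PySem.List.slice? fin.1 none none (-1)).getD []

-- ===== PORT B =====
-- one iteration of B's loop: state = (board, (heights, placed))
def pvBstep (st : List (List String) × List Int × Int) (pos : Int) :
    List (List String) × List Int × Int :=
  let h := PySem.List.pyGetD st.2.1 pos 0
  if h < 6 then
    (PySem.List.pySetD st.1 h
       (PySem.List.pySetD (PySem.List.pyGetD st.1 h [])
          pos (if PySem.Int.mod st.2.2 2 = 0 then "Y" else "R")),
     PySem.List.pySetD st.2.1 pos (h + 1),
     st.2.2 + 1)
  else st

def connect_four_place_alt (columns : List Int) : List (List String) :=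
  let board : List (List String) := List.replicate 6 (List.replicate 7 "-")
  let fin := columns.foldl pvBstep (board, List.replicate 7 (0 : Int), 0)
  (PySem.List.slice? fin.1 none none (-1)).getD []

-- ===== PRECONDITION & SPEC =====
-- Pre_ excludes column indices outside -7..6, on which both Pythons raise IndexError.
def Pre_connect_four_place (columns : List Int) : Prop :=
  ∀ pos ∈ columns, PySem.Raise.InRange 7 pos
instance (columns : List Int) : Decidable (Pre_connect_four_place columns) := by
  unfold Pre_connect_four_place; infer_instance

def pvWitness_connect_four_place : List Int := [0, 3, 0, -1, 6, 3, 0]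

def Spec_connect_four_place (columns : List Int) (out : List (List String)) : Prop := out = connect_four_place_alt columns
instance (columns : List Int) (out : List (List String)) : Decidable (Spec_connect_four_place columns out) := by unfold Spec_connect_four_place; infer_instance

-- ===== CLAIM (what is proved, stated in full; the proofs are below) =====
def Claim_equal_connect_four_place : Prop := ∀ (columns : List Int), Dom_connect_four_place columns → Pre_connect_four_place columns → Spec_connect_four_place columns (connect_four_place columns)

-- ===== LEMMAS AND PROOFS =====

-- the Nat column index a Python index pos ∈ -7..6 denotes
def pvIdx (pos : Int) : Nat := if 0 ≤ pos then pos.toNat else 7 - (-pos).toNat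

lemma pvIdx_lt (pos : Int) (hp : PySem.Raise.InRange 7 pos) : pvIdx pos < 7 := by
  obtain ⟨h1, h2⟩ := hp; unfold pvIdx; split <;> omega

lemma pyIdx_norm (pos : Int) (hp : PySem.Raise.InRange 7 pos) :
    PySem.List.pyIdx? 7 pos = some (pvIdx pos) := by
  obtain ⟨h1, h2⟩ := hp
  simp only [PySem.List.pyIdx?, pvIdx]
  split <;> simp_all

lemma pyGet_norm {α : Type} (row : List α) (h7 : row.length = 7) (pos : Int)
    (hp : PySem.Raise.InRange 7 pos) :
    PySem.List.pyGet? row pos = row[pvIdx pos]? := by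
  simp [PySem.List.pyGet?, h7, pyIdx_norm pos hp]

lemma pyGetD_norm {α : Type} (row : List α) (h7 : row.length = 7) (pos : Int) (d : α)
    (hp : PySem.Raise.InRange 7 pos) :
    PySem.List.pyGetD row pos d = row.getD (pvIdx pos) d := by
  rw [PySem.List.pyGetD, pyGet_norm row h7 pos hp, List.getD_eq_getElem?_getD]

lemma pySetD_norm {α : Type} (row : List α) (h7 : row.length = 7) (pos : Int) (v : α)
    (hp : PySem.Raise.InRange 7 pos) :
    PySem.List.pySetD row pos v = row.set (pvIdx pos) v := by
  simp [PySem.List.pySetD, PySem.List.pySet?, h7, pyIdx_norm pos hp]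

lemma pvSetGetD_self {α : Type} (xs : List α) (i : Nat) (v d : α) (h : i < xs.length) :
    (xs.set i v).getD i d = v := by
  simp [List.getD_eq_getElem?_getD, h]

lemma pvSetGetD_ne {α : Type} (xs : List α) (i j : Nat) (v d : α) (hne : j ≠ i) :
    (xs.set i v).getD j d = xs.getD j d := by
  simp [List.getD_eq_getElem?_getD, List.getElem?_set_ne (fun hh => hne hh.symm)]

-- the invariant tying A's (source, token) to B's (heights, placed); the board is shared
def pvInv (src : List (List String)) (token : List String)
    (heights : List Int) (placed : Int) : Prop :=
  src.length = 6 ∧ (∀ row ∈ src, row.length = 7) ∧ heights.length = 7 ∧ 0 ≤ placed ∧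
  token = (if PySem.Int.mod placed 2 = 0 then ["Y", "R"] else ["R", "Y"]) ∧
  ∀ c < 7, ∃ h : Nat, h ≤ 6 ∧ heights.getD c 0 = (h : Int) ∧
    ∀ r < 6, ((src.getD r []).getD c "" = "-" ↔ h ≤ r)

-- A's inner row scan, characterized in a column whose fill height is h
lemma ainner_char (pos : Int) (tok : String) (hp : PySem.Raise.InRange 7 pos) :
    ∀ (src : List (List String)) (h : Nat),
      (∀ row ∈ src, row.length = 7) →
      (∀ r < src.length, ((src.getD r []).getD (pvIdx pos) "" = "-" ↔ h ≤ r)) →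
      pvAinner pos tok src =
        if h < src.length then
          (src.set h ((src.getD h []).set (pvIdx pos) tok), true)
        else (src, false) := by
  intro src
  induction src with
  | nil => intro h _ _; simp [pvAinner]
  | cons row rest ih =>
    intro h hlen hst
    have hrow7 : row.length = 7 := hlen row (by simp)
    have hc7 : pvIdx pos < 7 := pvIdx_lt pos hp
    have hget : PySem.List.pyGet? row pos = row[pvIdx pos]? :=
      pyGet_norm row hrow7 pos hp
    have hcell : row[pvIdx pos]? = some (row.getD (pvIdx pos) "") := by
      rw [List.getElem?_eq_getElem (show pvIdx pos < row.length by omega),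
        List.getD_eq_getElem _ _ (show pvIdx pos < row.length by omega)]
    have h0 := hst 0 (by simp)
    simp only [List.getD_cons_zero] at h0
    match h with
    | 0 =>
      have hdash : row.getD (pvIdx pos) "" = "-" := h0.2 (le_refl 0)
      simp only [pvAinner]
      rw [hget, hcell, hdash, if_pos rfl, pySetD_norm row hrow7 pos tok hp]
      rw [if_pos (by simp : 0 < (row :: rest).length)]
      simp
    | Nat.succ n =>
      have hnd : ¬ row.getD (pvIdx pos) "" = "-" := fun hc => by
        have := h0.mp hc; omega
      have hrec := ih n (fun r hr => hlen r (by simp [hr]))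
        (fun r hr => by
          have := hst (r + 1) (by simpa using Nat.succ_lt_succ hr)
          simpa [Nat.succ_le_succ_iff] using this)
      simp only [pvAinner, hget, hcell, Option.some.injEq, hnd, if_false]
      rw [hrec]
      by_cases hlt : n < rest.length
      · simp [hlt]
      · simp [hlt]

-- one loop iteration: boards stay equal and the invariant is preserved
lemma step_char (src : List (List String)) (token : List String)
    (heights : List Int) (placed : Int) (pos : Int)
    (hp : PySem.Raise.InRange 7 pos) (hI : pvInv src token heights placed) :
    (pvAstep (src, token) pos).1 = (pvBstep (src, heights, placed) pos).1 ∧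
    pvInv (pvAstep (src, token) pos).1 (pvAstep (src, token) pos).2
      (pvBstep (src, heights, placed) pos).2.1 (pvBstep (src, heights, placed) pos).2.2 := by
  obtain ⟨hL, hRows, hHL, hP, hTok, hCols⟩ := hI
  have hc7 : pvIdx pos < 7 := pvIdx_lt pos hp
  obtain ⟨h, hh6, hhc, hstair⟩ := hCols (pvIdx pos) hc7
  -- A's current token head = B's current colour
  have htokhd : PySem.List.pyGetD token 0 "" =
      (if PySem.Int.mod placed 2 = 0 then "Y" else "R") := by
    rcases em (PySem.Int.mod placed 2 = 0) with hpar | hpar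
    · rw [hTok, if_pos hpar, if_pos hpar]; decide
    · rw [hTok, if_neg hpar, if_neg hpar]; decide
  have hA := ainner_char pos (PySem.List.pyGetD token 0 "") hp src h hRows
    (by rw [hL]; exact hstair)
  have hBh : PySem.List.pyGetD heights pos 0 = (h : Int) := by
    rw [pyGetD_norm heights hHL pos 0 hp, hhc]
  by_cases hlt : h < 6
  · -- a token is placed at row h, column pvIdx pos
    have hrowlen : (src.getD h []).length = 7 :=
      hRows _ (by rw [List.getD_eq_getElem?_getD, List.getElem?_eq_getElem (by omega)]
                  exact List.getElem_mem _)
    have hparmod : PySem.Int.mod (placed + 1) 2 =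
        if PySem.Int.mod placed 2 = 0 then 1 else 0 := by
      rw [PySem.Int.mod_eq_emod_of_pos (by omega), PySem.Int.mod_eq_emod_of_pos (by omega)]
      omega
    rw [htokhd] at hA
    rw [hL] at hA
    rw [if_pos hlt] at hA
    have hAstep : pvAstep (src, token) pos =
        (src.set h ((src.getD h []).set (pvIdx pos)
          (if PySem.Int.mod placed 2 = 0 then "Y" else "R")), token.reverse) := by
      simp only [pvAstep, htokhd, hA]
      simp
    have hBstep : pvBstep (src, heights, placed) pos =
        (src.set h ((src.getD h []).set (pvIdx pos)
          (if PySem.Int.mod placed 2 = 0 then "Y" else "R")),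
         heights.set (pvIdx pos) ((h : Int) + 1), placed + 1) := by
      simp only [pvBstep, hBh]
      rw [if_pos (by exact_mod_cast hlt : (h : Int) < 6)]
      rw [PySem.List.pyGetD_natCast]
      rw [pySetD_norm (src.getD h []) hrowlen pos _ hp]
      rw [PySem.List.pySetD_natCast]
      rw [pySetD_norm heights hHL pos _ hp]
    rw [hAstep, hBstep]
    have hrowlen2 : ((src[h]?).getD []).length = 7 := by
      rw [← List.getD_eq_getElem?_getD]; exact hrowlen
    refine ⟨rfl, ?_⟩
    show pvInv (src.set h ((src.getD h []).set (pvIdx pos)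
        (if PySem.Int.mod placed 2 = 0 then "Y" else "R"))) token.reverse
      (heights.set (pvIdx pos) ((h : Int) + 1)) (placed + 1)
    refine ⟨by simp [hL], ?_, by simp [hHL], by omega, ?_, ?_⟩
    · -- all rows still have length 7
      intro row hmem
      obtain ⟨i, hi, rfl⟩ := List.mem_iff_getElem.mp hmem
      rw [List.getElem_set]
      split
      · simp [hrowlen2]
      · exact hRows _ (List.getElem_mem _)
    · -- the token list alternates with the placement count
      rcases em (PySem.Int.mod placed 2 = 0) with hpar | hpar
      · rw [hTok, if_pos hpar, hparmod, if_pos hpar, if_neg (by norm_num)]; decide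
      · rw [hTok, if_neg hpar, hparmod, if_neg hpar, if_pos rfl]; decide
    · -- the staircase per column
      intro c' hc'
      by_cases hcc : c' = pvIdx pos
      · subst hcc
        refine ⟨h + 1, by omega, ?_, ?_⟩
        · rw [pvSetGetD_self heights (pvIdx pos) ((h : Int) + 1) 0 (by omega)]
          push_cast
          ring
        · intro r hr
          by_cases hrh : r = h
          · subst hrh
            rw [pvSetGetD_self src r _ [] (by omega)]
            rw [pvSetGetD_self (src.getD r []) (pvIdx pos) _ "" (by omega)]
            constructor
            · intro hdash
              rcases em (PySem.Int.mod placed 2 = 0) with hpar | hpar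
              · rw [if_pos hpar] at hdash; exact absurd hdash (by decide)
              · rw [if_neg hpar] at hdash; exact absurd hdash (by decide)
            · omega
          · rw [pvSetGetD_ne src h r _ [] hrh]
            rw [hstair r hr]
            omega
      · obtain ⟨h', hh6', hhc', hstair'⟩ := hCols c' hc'
        refine ⟨h', hh6', ?_, ?_⟩
        · rw [pvSetGetD_ne heights (pvIdx pos) c' _ 0 hcc]
          exact hhc'
        · intro r hr
          by_cases hrh : r = h
          · subst hrh
            rw [pvSetGetD_self src r _ [] (by omega)]
            rw [pvSetGetD_ne (src.getD r []) (pvIdx pos) c' _ "" hcc]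
            exact hstair' _ hr
          · rw [pvSetGetD_ne src h r _ [] hrh]
            exact hstair' _ hr
  · -- the column is full: both sides skip, nothing changes
    have h6 : h = 6 := by omega
    have hAstep : pvAstep (src, token) pos = (src, token) := by
      simp only [pvAstep, hA, hL, h6]
      simp
    have hBstep : pvBstep (src, heights, placed) pos = (src, heights, placed) := by
      simp only [pvBstep, hBh, h6]
      norm_num
    rw [hAstep, hBstep]
    exact ⟨rfl, hL, hRows, hHL, hP, hTok, hCols⟩

-- the whole fold keeps the two boards equal
lemma fold_eq (columns : List Int) :
    ∀ (src : List (List String)) (token : List String) (heights : List Int) (placed : Int),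
      (∀ pos ∈ columns, PySem.Raise.InRange 7 pos) →
      pvInv src token heights placed →
      (columns.foldl pvAstep (src, token)).1 =
        (columns.foldl pvBstep (src, heights, placed)).1 := by
  induction columns with
  | nil => intro src token heights placed _ _; rfl
  | cons pos rest ih =>
    intro src token heights placed hPre hI
    obtain ⟨hEq, hI'⟩ := step_char src token heights placed pos (hPre pos (by simp)) hI
    simp only [List.foldl_cons]
    rcases hAdef : pvAstep (src, token) pos with ⟨a1, a2⟩
    rcases hBdef : pvBstep (src, heights, placed) pos with ⟨b1, b2, b3⟩
    rw [hAdef, hBdef] at hEq hI'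
    simp only at hEq hI'
    subst hEq
    exact ih _ _ _ _ (fun p hpm => hPre p (by simp [hpm])) hI'

lemma init_inv : pvInv
    [["-", "-", "-", "-", "-", "-", "-"],
     ["-", "-", "-", "-", "-", "-", "-"],
     ["-", "-", "-", "-", "-", "-", "-"],
     ["-", "-", "-", "-", "-", "-", "-"],
     ["-", "-", "-", "-", "-", "-", "-"],
     ["-", "-", "-", "-", "-", "-", "-"]]
    ["Y", "R"] (List.replicate 7 (0 : Int)) 0 := by
  refine ⟨rfl, by decide, rfl, le_refl 0, by decide, ?_⟩
  intro c hc
  exact ⟨0, by omega, by interval_cases c <;> decide, by intro r hr; interval_cases c <;> interval_cases r <;> decide⟩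

-- ===== VERDICT (by name: the statement is the Claim_ definition above) =====
theorem connect_four_place_spec : Claim_equal_connect_four_place := by
  intro columns _ hPre
  unfold Spec_connect_four_place
  show connect_four_place columns = connect_four_place_alt columns
  have hboard : (List.replicate 6 (List.replicate 7 "-") : List (List String)) =
      [["-", "-", "-", "-", "-", "-", "-"],
       ["-", "-", "-", "-", "-", "-", "-"],
       ["-", "-", "-", "-", "-", "-", "-"],
       ["-", "-", "-", "-", "-", "-", "-"],
       ["-", "-", "-", "-", "-", "-", "-"],
       ["-", "-", "-", "-", "-", "-", "-"]] := by decide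
  simp only [connect_four_place, connect_four_place_alt, hboard]
  rw [fold_eq columns _ _ _ _ hPre init_inv]
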